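-- pv_equiv track=rewrite | github.com/voidlessVoid/advent_of_code_2020 | day_16/gerrit/16.py | possible_fields
-- ===== SOURCE A (Python) =====
-- def validate_ranges(ranges, value):
--     return any(
--         lb <= value <=ub
--         for lb, ub in ranges
--     )
--
-- def possible_fields(header, values):
--     return [
--         field
--         for field, ranges in header.items()
--         if all(
--             validate_ranges(ranges, value)
--             for value in values
--         )
--     ]
-- ===== SOURCE B (Python) =====
-- def possible_fields(header, values):
--     # Different algorithm: normalize each field's ranges by sorting them by lower
--     # bound and sweep-merging overlapping ones into a stack of intervals with the
--     # same union (most recent on top); then test every value against the merged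
--     # intervals. Correct because merging two overlapping sorted intervals
--     # preserves the union of accepted values.
--     result = []
--     for field, ranges in header.items():
--         stack = []
--         for lb, ub in sorted(ranges, key=lambda r: r[0]):
--             if stack and lb <= stack[0][1]:
--                 if ub > stack[0][1]:
--                     stack[0] = (stack[0][0], ub)
--             else:
--                 stack = [(lb, ub)] + stack
--         if all(any(lb <= v <= ub for lb, ub in stack) for v in values):
--             result.append(field)
--     return result
-- ===== Notes on version B (the rewrite author's own statement) =====
-- stated objective: alternative
-- what changed: B first normalizes each field's range list by sorting it by lower bound and sweep-merging overlapping intervals into a union-preserving interval stack, then tests every value against the merged intervals, instead of A's direct any-over-raw-ranges test per value.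
import Mathlib
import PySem

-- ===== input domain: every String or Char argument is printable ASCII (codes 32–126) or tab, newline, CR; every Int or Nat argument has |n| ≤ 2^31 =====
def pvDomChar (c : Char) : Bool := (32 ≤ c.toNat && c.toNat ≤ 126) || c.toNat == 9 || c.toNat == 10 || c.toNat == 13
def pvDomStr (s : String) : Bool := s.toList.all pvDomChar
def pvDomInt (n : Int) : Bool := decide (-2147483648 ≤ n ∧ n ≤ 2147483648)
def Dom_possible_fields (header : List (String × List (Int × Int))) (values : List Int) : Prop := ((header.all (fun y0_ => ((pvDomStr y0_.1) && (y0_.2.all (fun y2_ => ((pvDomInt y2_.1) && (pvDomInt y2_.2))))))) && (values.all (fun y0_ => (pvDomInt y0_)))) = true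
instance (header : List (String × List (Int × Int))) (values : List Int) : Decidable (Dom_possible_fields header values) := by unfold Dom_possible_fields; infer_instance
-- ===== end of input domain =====

-- ===== PORT A =====
-- port of validate_ranges: any(lb <= value <= ub for lb, ub in ranges)
def validate_ranges (ranges : List (Int × Int)) (value : Int) : Bool :=
  ranges.any (fun r => decide (r.1 ≤ value) && decide (value ≤ r.2))

def possible_fields (header : List (String × List (Int × Int))) (values : List Int) : List String :=
  (header.filter (fun p => values.all (fun value => validate_ranges p.2 value))).map Prod.fst

-- ===== PORT B =====
-- B (alternative algorithm): normalize each field's ranges — sort by lower bound and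
-- sweep-merge overlapping intervals into a union-preserving stack — then test values
-- against the merged intervals.
def pfInRange (v : Int) (r : Int × Int) : Bool :=
  decide (r.1 ≤ v) && decide (v ≤ r.2)

-- one sweep step of Source B's inner loop: merge (lb, ub) into the stack (top interval first)
def pfStep (stack : List (Int × Int)) (r : Int × Int) : List (Int × Int) :=
  match stack with
  | top :: rest =>
    if r.1 ≤ top.2 then
      if r.2 > top.2 then (top.1, r.2) :: rest else top :: rest
    else r :: top :: rest
  | [] => [r]

def pfMerged (ranges : List (Int × Int)) : List (Int × Int) :=
  (PySem.List.sorted ranges (fun r => r.1) false).foldl pfStep []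

def possible_fields_alt (header : List (String × List (Int × Int))) (values : List Int) : List String :=
  header.foldl (fun result p =>
    let stack := pfMerged p.2
    if values.all (fun v => stack.any (pfInRange v)) then result ++ [p.1] else result) []

-- ===== PRECONDITION & SPEC =====
def Spec_possible_fields (header : List (String × List (Int × Int))) (values : List Int) (out : List String) : Prop := out = possible_fields_alt header values
instance (header : List (String × List (Int × Int))) (values : List Int) (out : List String) : Decidable (Spec_possible_fields header values out) := by unfold Spec_possible_fields; infer_instance

-- ===== CLAIM (what is proved, stated in full; the proofs are below) =====
def Claim_equal_possible_fields : Prop := ∀ (header : List (String × List (Int × Int))) (values : List Int), Dom_possible_fields header values → Spec_possible_fields header values (possible_fields header values)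

-- ===== LEMMAS AND PROOFS =====

-- one merge step preserves the accepted-value test, provided the incoming lower
-- bound is at least the top interval's lower bound
lemma pfStep_any (s : List (Int × Int)) (r : Int × Int) (v : Int)
    (hle : ∀ t, s.head? = some t → t.1 ≤ r.1) :
    (pfStep s r).any (pfInRange v) = (s.any (pfInRange v) || pfInRange v r) := by
  cases s with
  | nil => simp [pfStep, Bool.or_comm]
  | cons top rest =>
    have htop : top.1 ≤ r.1 := hle top rfl
    by_cases h1 : r.1 ≤ top.2
    · by_cases h2 : r.2 > top.2
      · simp only [pfStep, if_pos h1, if_pos h2, List.any_cons, Bool.or_assoc]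
        cases rest.any (pfInRange v) <;>
          (rw [Bool.eq_iff_iff]; simp [pfInRange]; try omega)
      · simp only [pfStep, if_pos h1, if_neg h2, List.any_cons, Bool.or_assoc]
        cases rest.any (pfInRange v) <;>
          (rw [Bool.eq_iff_iff]; simp [pfInRange]; try omega)
    · simp only [pfStep, if_neg h1, List.any_cons]
      cases rest.any (pfInRange v) <;> cases pfInRange v top <;> cases pfInRange v r <;> rfl

-- the lower bound at the top of the stack never exceeds the incoming lower bound
lemma pfStep_head (s : List (Int × Int)) (r : Int × Int) (t : Int × Int)
    (hle : ∀ u, s.head? = some u → u.1 ≤ r.1)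
    (ht : (pfStep s r).head? = some t) : t.1 ≤ r.1 := by
  cases s with
  | nil => simp [pfStep] at ht; simp [← ht]
  | cons top rest =>
    have htop : top.1 ≤ r.1 := hle top rfl
    by_cases h1 : r.1 ≤ top.2
    · by_cases h2 : r.2 > top.2
      · simp [pfStep, h1, h2] at ht; simp [← ht]; omega
      · simp [pfStep, h1, h2] at ht; simp [← ht]; omega
    · simp [pfStep, h1] at ht; simp [← ht]

-- folding the sweep over a list sorted by lower bound preserves the accepted-value test
lemma foldl_pfStep_any (rs : List (Int × Int)) (s : List (Int × Int)) (v : Int)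
    (hp : rs.Pairwise (fun a b => a.1 ≤ b.1))
    (hs : ∀ r ∈ rs, ∀ t, s.head? = some t → t.1 ≤ r.1) :
    (rs.foldl pfStep s).any (pfInRange v) = (s.any (pfInRange v) || rs.any (pfInRange v)) := by
  induction rs generalizing s with
  | nil => simp
  | cons r rs ih =>
    have hhead : ∀ t, s.head? = some t → t.1 ≤ r.1 := hs r (List.mem_cons_self ..)
    have hfirst := (List.pairwise_cons.mp hp).1
    have hs' : ∀ x ∈ rs, ∀ t, (pfStep s r).head? = some t → t.1 ≤ x.1 := by
      intro x hx t ht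
      have h1 := pfStep_head s r t hhead ht
      have h2 := hfirst x hx
      omega
    rw [List.foldl_cons, ih (pfStep s r) (List.pairwise_cons.mp hp).2 hs',
      pfStep_any s r v hhead]
    simp [Bool.or_comm, Bool.or_left_comm, Bool.or_assoc]

-- sorting and merging together preserve the accepted-value test
lemma pfMerged_any (rs : List (Int × Int)) (v : Int) :
    (pfMerged rs).any (pfInRange v) = rs.any (pfInRange v) := by
  unfold pfMerged
  rw [foldl_pfStep_any _ _ _ (PySem.List.sorted_pairwise rs (fun r => r.1))
      (by intro _ _ t h; simp at h)]
  rw [Bool.eq_iff_iff]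
  simp only [List.any_nil, Bool.false_or, List.any_eq_true, PySem.List.mem_sorted]

-- ===== VERDICT (by name: the statement is the Claim_ definition above) =====
theorem possible_fields_spec : Claim_equal_possible_fields := by
  intro header values _
  unfold Spec_possible_fields possible_fields possible_fields_alt
  show _ = header.foldl (fun result p =>
    if values.all (fun v => (pfMerged p.2).any (pfInRange v)) then result ++ [p.1]
    else result) []
  rw [PySem.List.foldl_append_if
      (fun p : String × List (Int × Int) => values.all (fun v => (pfMerged p.2).any (pfInRange v)))
      Prod.fst]
  simp only [List.nil_append]
  congr 1
  apply List.filter_congr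
  intro p _
  congr 1
  funext v
  exact (pfMerged_any p.2 v).symm
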